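-- pv_equiv track=rewrite | github.com/vincenzotalia/Control-room | backend/agora_analysis.py | _tp_category
-- ===== SOURCE A (Python) =====
-- KARDEX_TP = "STOCCAGGIO ARMADIO VERTICALE"
--
-- ABBASS_TP = {"RIPRIST.TOT DA SCORTA A PRESA", "RIPRIST.PRZ DA SCORTA A PRESA"}
--
-- STOK_TP = {"RISTOCC. DOPO RIPR. PARZIALE", "STOCCAGGIO IN SCORTA", "STOCCAGGIO IN PRESA"}
--
-- def _norm_tp(s: str) -> str:
--     return str(s).strip().upper()
--
-- def _tp_category(tp_norm: str) -> str:
--     if tp_norm == _norm_tp(KARDEX_TP):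
--         return "KARDEX"
--     if tp_norm in {_norm_tp(x) for x in ABBASS_TP}:
--         return "ABBASSAMENTI"
--     if tp_norm in {_norm_tp(x) for x in STOK_TP}:
--         return "STOK"
--     return "ALTRO"
-- ===== SOURCE B (Python) =====
-- # gperf-style classifier: dispatch on len(tp_norm), then confirm with at most
-- # one (or one-of-two) direct string comparison; no sets, no normalization.
-- def _tp_category(tp_norm: str) -> str:
--     n = len(tp_norm)
--     if n == 19:
--         if tp_norm == "STOCCAGGIO IN PRESA":
--             return "STOK"
--     elif n == 20:
--         if tp_norm == "STOCCAGGIO IN SCORTA":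
--             return "STOK"
--     elif n == 28:
--         if tp_norm == "STOCCAGGIO ARMADIO VERTICALE":
--             return "KARDEX"
--         if tp_norm == "RISTOCC. DOPO RIPR. PARZIALE":
--             return "STOK"
--     elif n == 29:
--         if tp_norm in ("RIPRIST.TOT DA SCORTA A PRESA", "RIPRIST.PRZ DA SCORTA A PRESA"):
--             return "ABBASSAMENTI"
--     return "ALTRO"
-- ===== Notes on version B (the rewrite author's own statement) =====
-- stated objective: alternative
-- what changed: Replaces A's per-call normalization of the three key collections and sequential set-membership tests by a gperf-style decision tree that first dispatches on the input's length and then confirms with at most one or two direct string comparisons; correct because the six (pre-normalized) keys are pairwise distinct and their lengths partition them.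
import Mathlib
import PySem

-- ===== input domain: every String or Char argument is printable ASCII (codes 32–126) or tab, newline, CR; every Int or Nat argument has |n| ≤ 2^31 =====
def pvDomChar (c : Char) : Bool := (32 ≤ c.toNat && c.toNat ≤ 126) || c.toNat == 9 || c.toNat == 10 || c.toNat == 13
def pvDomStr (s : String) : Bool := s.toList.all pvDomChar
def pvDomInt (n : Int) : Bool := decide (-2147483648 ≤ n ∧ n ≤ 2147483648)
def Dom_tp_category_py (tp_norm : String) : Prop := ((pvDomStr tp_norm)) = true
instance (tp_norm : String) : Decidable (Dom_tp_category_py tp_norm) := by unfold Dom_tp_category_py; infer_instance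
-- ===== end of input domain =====

-- B replaces A's per-call set normalization and sequential membership tests by a gperf-style
-- decision tree dispatching on the input's length, then confirming with direct comparisons (alternative).

-- ===== PORT A =====
def pvKardexTp : String := "STOCCAGGIO ARMADIO VERTICALE"
def pvAbbassTp : PySem.Set String :=
  PySem.Set.ofList ["RIPRIST.TOT DA SCORTA A PRESA", "RIPRIST.PRZ DA SCORTA A PRESA"]
def pvStokTp : PySem.Set String :=
  PySem.Set.ofList ["RISTOCC. DOPO RIPR. PARZIALE", "STOCCAGGIO IN SCORTA", "STOCCAGGIO IN PRESA"]

def pvNormTp (s : String) : String := PySem.Str.upper (PySem.Str.strip s)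

def tp_category_py (tp_norm : String) : String :=
  if tp_norm == pvNormTp pvKardexTp then "KARDEX"
  else if PySem.Set.contains (PySem.Set.ofList (pvAbbassTp.map pvNormTp)) tp_norm then "ABBASSAMENTI"
  else if PySem.Set.contains (PySem.Set.ofList (pvStokTp.map pvNormTp)) tp_norm then "STOK"
  else "ALTRO"

-- ===== PORT B =====
-- Source B: dispatch on len(tp_norm), then confirm with at most one-or-two direct comparisons.
def tp_category_py_alt (tp_norm : String) : String :=
  let n := PySem.Str.len tp_norm
  if n == 19 then
    if tp_norm == "STOCCAGGIO IN PRESA" then "STOK" else "ALTRO"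
  else if n == 20 then
    if tp_norm == "STOCCAGGIO IN SCORTA" then "STOK" else "ALTRO"
  else if n == 28 then
    if tp_norm == "STOCCAGGIO ARMADIO VERTICALE" then "KARDEX"
    else if tp_norm == "RISTOCC. DOPO RIPR. PARZIALE" then "STOK"
    else "ALTRO"
  else if n == 29 then
    if tp_norm == "RIPRIST.TOT DA SCORTA A PRESA" || tp_norm == "RIPRIST.PRZ DA SCORTA A PRESA" then
      "ABBASSAMENTI"
    else "ALTRO"
  else "ALTRO"

-- ===== PRECONDITION & SPEC =====
def Spec_tp_category_py (tp_norm : String) (out : String) : Prop := out = tp_category_py_alt tp_norm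
instance (tp_norm : String) (out : String) : Decidable (Spec_tp_category_py tp_norm out) := by unfold Spec_tp_category_py; infer_instance

-- ===== CLAIM (what is proved, stated in full; the proofs are below) =====
def Claim_equal_tp_category_py : Prop := ∀ (tp_norm : String), Dom_tp_category_py tp_norm → Spec_tp_category_py tp_norm (tp_category_py tp_norm)

-- ===== LEMMAS AND PROOFS =====
theorem pv_eq (tp_norm : String) : tp_category_py tp_norm = tp_category_py_alt tp_norm := by
  have hk : pvNormTp pvKardexTp = "STOCCAGGIO ARMADIO VERTICALE" := by decide
  have ha : PySem.Set.ofList (pvAbbassTp.map pvNormTp) =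
      ["RIPRIST.TOT DA SCORTA A PRESA", "RIPRIST.PRZ DA SCORTA A PRESA"] := by decide
  have hs : PySem.Set.ofList (pvStokTp.map pvNormTp) =
      ["RISTOCC. DOPO RIPR. PARZIALE", "STOCCAGGIO IN SCORTA", "STOCCAGGIO IN PRESA"] := by decide
  by_cases h1 : tp_norm = "STOCCAGGIO ARMADIO VERTICALE"; · subst h1; decide
  by_cases h2 : tp_norm = "RIPRIST.TOT DA SCORTA A PRESA"; · subst h2; decide
  by_cases h3 : tp_norm = "RIPRIST.PRZ DA SCORTA A PRESA"; · subst h3; decide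
  by_cases h4 : tp_norm = "RISTOCC. DOPO RIPR. PARZIALE"; · subst h4; decide
  by_cases h5 : tp_norm = "STOCCAGGIO IN SCORTA"; · subst h5; decide
  by_cases h6 : tp_norm = "STOCCAGGIO IN PRESA"; · subst h6; decide
  unfold tp_category_py tp_category_py_alt
  rw [hk, ha, hs]
  simp [PySem.Set.contains, h1, h2, h3, h4, h5, h6]

-- ===== VERDICT (by name: the statement is the Claim_ definition above) =====
theorem tp_category_py_spec : Claim_equal_tp_category_py := by
  intro tp_norm _
  exact pv_eq tp_norm
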